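-- pv_equiv track=rewrite | github.com/kyrie0126/Advent_of_Code_2023 | day3/gear2.py | detect_nums
-- ===== SOURCE A (Python) =====
-- def detect_nums(row):
--     nums = ("0","1","2","3","4","5","6","7","8","9")
--     x = []
--     x_val = []
--     x_valid = []
--     x_nums = []
--     for i in range(len(row.strip())):
--
--         # edge case if last character is a number
--         if row[i] in nums and i == max(range(len(row.strip()))):
--             x.append(row[i])
--             x_val.append(i)
--             temp = ""
--             for char in x:
--                 temp += char
--             x_nums.append(int(temp))
--
--             x_val.append(max(x_val)+1)
--             x_val.insert(0,min(x_val)-1)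
--             x_valid.append(x_val)
--
--             x = []
--             x_val = []
--
--         # regular case for detecting the start of a number grouping
--         elif row[i] in nums:
--             x.append(row[i])
--             x_val.append(i)
--
--         # case for detecting the end of a number grouping
--         elif row[i] not in nums and len(x) > 0:
--             temp = ""
--             for char in x:
--                 temp += char
--             x_nums.append(int(temp))
--
--             x_val.append(max(x_val)+1)
--             x_val.insert(0,min(x_val)-1)
--             x_valid.append(x_val)
--
--             x = []
--             x_val = []
--
--     return x_nums, x_valid
-- ===== SOURCE B (Python) =====
-- def detect_nums(row):
--     # Run-at-a-time scan: slice off the scanned prefix row[:len(row.strip())],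
--     # then jump over each maximal digit run instead of stepping char by char.
--     s = row[:len(row.strip())]
--     x_nums = []
--     x_valid = []
--     i = 0
--     while i < len(s):
--         if "0" <= s[i] <= "9":
--             j = i
--             while j < len(s) and "0" <= s[j] <= "9":
--                 j += 1
--             x_nums.append(int(s[i:j]))
--             x_valid.append(list(range(i - 1, j + 1)))
--             i = j
--         else:
--             i += 1
--     return x_nums, x_valid
-- ===== Notes on version B (the rewrite author's own statement) =====
-- stated objective: simpler
-- what changed: Replaces A's char-by-char state machine (pending digit-char and index accumulators, string re-accumulation and min()/max() recomputation at every flush) with a run-at-a-time scan that jumps over each maximal digit run and emits int(s[i:j]) and list(range(i-1, j+1)) directly.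
import Mathlib
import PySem

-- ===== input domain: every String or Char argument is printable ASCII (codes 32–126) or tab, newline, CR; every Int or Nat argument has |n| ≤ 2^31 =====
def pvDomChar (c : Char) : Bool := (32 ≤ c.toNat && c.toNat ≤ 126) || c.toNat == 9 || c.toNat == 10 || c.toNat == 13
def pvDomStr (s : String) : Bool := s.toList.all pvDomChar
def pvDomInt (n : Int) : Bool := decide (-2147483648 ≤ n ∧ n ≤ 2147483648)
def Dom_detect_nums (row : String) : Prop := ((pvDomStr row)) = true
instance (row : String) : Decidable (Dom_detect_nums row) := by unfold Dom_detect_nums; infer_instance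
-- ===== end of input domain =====

-- B replaces A's char-by-char state machine (pending-digit/pending-index accumulators, string
-- re-accumulation and min/max recomputation at every flush) by a run-at-a-time scan that jumps
-- over each maximal digit run and emits its value and neighbour index range directly (simpler).

-- ===== PORT A =====
-- nums = ("0","1","2","3","4","5","6","7","8","9")
-- The for-loop runs over i in range(n), n = len(row.strip()) ≤ len(row), i.e. over exactly the
-- first n characters of row; so `rest = []` holds exactly at the last visited index and ports
-- `i == max(range(len(row.strip())))`.  temp is built char by char as in A (strings as
-- List Char); int(temp) is PySem.Int.ofChars?.  temp is always a nonempty digit string and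
-- x_val is nonempty at every max()/min() call, so the .getD defaults are never used.
def pvNums : List Char := ['0','1','2','3','4','5','6','7','8','9']

def pvAloop : List Char → Int → List Char → List Int → List (List Int) → List Int → List Int × List (List Int)
  | [], _, _x, _xval, xvalid, xnums => (xnums, xvalid)
  | c :: rest, i, x, xval, xvalid, xnums =>
    if c ∈ pvNums ∧ rest = [] then
      let x1 := x ++ [c]
      let xval1 := xval ++ [i]
      let temp := x1.foldl (fun t ch => t ++ [ch]) ([] : List Char)
      let xnums1 := xnums ++ [(PySem.Int.ofChars? temp).getD 0]
      let xval2 := xval1 ++ [(PySem.List.max? xval1 (fun y => y)).getD 0 + 1]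
      let xval3 := ((PySem.List.min? xval2 (fun y => y)).getD 0 - 1) :: xval2
      pvAloop rest (i + 1) [] [] (xvalid ++ [xval3]) xnums1
    else if c ∈ pvNums then
      pvAloop rest (i + 1) (x ++ [c]) (xval ++ [i]) xvalid xnums
    else if x.length > 0 then
      let temp := x.foldl (fun t ch => t ++ [ch]) ([] : List Char)
      let xnums1 := xnums ++ [(PySem.Int.ofChars? temp).getD 0]
      let xval2 := xval ++ [(PySem.List.max? xval (fun y => y)).getD 0 + 1]
      let xval3 := ((PySem.List.min? xval2 (fun y => y)).getD 0 - 1) :: xval2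
      pvAloop rest (i + 1) [] [] (xvalid ++ [xval3]) xnums1
    else
      pvAloop rest (i + 1) x xval xvalid xnums

def detect_nums (row : String) : List Int × List (List Int) :=
  let n := (PySem.Chars.strip row.toList).length
  pvAloop (row.toList.take n) 0 [] [] [] []

-- ===== PORT B =====
-- "0" <= c <= "9"
def pvDigB (c : Char) : Bool := decide ('0' ≤ c ∧ c ≤ '9')

-- The while-loop of B over s = row[:n] (n = len(row.strip()), so the slice is List.take n):
-- on a digit, the inner while advances j past the maximal digit run (takeWhile/dropWhile),
-- int(s[i:j]) is PySem.Int.ofChars? (nonempty digit run, .getD never used),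
-- list(range(i-1, j+1)) is PySem.List.pyRange.
def pvBloop : List Char → Int → List Int × List (List Int)
  | [], _ => ([], [])
  | c :: rest, i =>
    if h : pvDigB c then
      let run := (c :: rest).takeWhile pvDigB
      let rest' := (c :: rest).dropWhile pvDigB
      let p := pvBloop rest' (i + run.length)
      (((PySem.Int.ofChars? run).getD 0) :: p.1,
       (PySem.List.pyRange (i - 1) (i + run.length + 1) 1) :: p.2)
    else
      pvBloop rest (i + 1)
termination_by l _ => l.length
decreasing_by
  · simp only [List.dropWhile_cons, h, if_true]
    exact Nat.lt_succ_of_le (List.length_dropWhile_le _ _)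
  · simp

def detect_nums_alt (row : String) : List Int × List (List Int) :=
  let n := (PySem.Chars.strip row.toList).length
  pvBloop (row.toList.take n) 0

-- ===== PRECONDITION & SPEC =====
def Spec_detect_nums (row : String) (out : List Int × List (List Int)) : Prop := out = detect_nums_alt row
instance (row : String) (out : List Int × List (List Int)) : Decidable (Spec_detect_nums row out) := by unfold Spec_detect_nums; infer_instance

-- ===== CLAIM (what is proved, stated in full; the proofs are below) =====
def Claim_equal_detect_nums : Prop := ∀ (row : String), Dom_detect_nums row → Spec_detect_nums row (detect_nums row)

-- ===== LEMMAS AND PROOFS =====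

theorem pv_dig_iff (c : Char) : c ∈ pvNums ↔ pvDigB c = true := by
  simp [pvNums, pvDigB, Char.le_def, Char.ext_iff, UInt32.ext_iff, UInt32.le_iff_toNat_le]
  omega

theorem pv_foldl_min_const (l : List Int) (x : Int) (h : ∀ y ∈ l, x ≤ y) : l.foldl min x = x := by
  induction l with
  | nil => rfl
  | cons c t ih =>
    simp only [List.foldl_cons]
    have hx : min x c = x := min_eq_left (h c (by simp))
    rw [hx]
    exact ih (fun y hy => h y (by simp [hy]))

theorem pv_min_pyRange (a b : Int) (h : a < b) :
    PySem.List.min? (PySem.List.pyRange a b 1) (fun y => y) = some a := by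
  rw [PySem.List.pyRange_one_cons h, PySem.List.min?_id_cons]
  rw [pv_foldl_min_const]
  intro y hy
  have := PySem.List.mem_pyRange_one.mp hy
  omega

theorem pv_foldl_max_range (n : Nat) : ∀ (a x : Int),
    (PySem.List.pyRange a (a + n) 1).foldl max x = if n = 0 then x else max x (a + n - 1) := by
  induction n with
  | zero => intro a x; simp [PySem.List.pyRange_one_eq_nil]
  | succ m ih =>
    intro a x
    rw [PySem.List.pyRange_one_cons (by omega)]
    simp only [List.foldl_cons]
    have h2 : a + ((m + 1 : Nat) : Int) = (a + 1) + (m : Int) := by push_cast; ring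
    rw [h2, ih (a + 1) (max x a)]
    by_cases hm : m = 0
    · subst hm; simp
    · simp only [hm, if_false, if_false]
      rcases max_cases x a with ⟨h1, _⟩ | ⟨h1, h1'⟩ <;> rw [h1] <;>
        simp [Int.max_def] <;> split_ifs <;> omega

theorem pv_max_pyRange (a b : Int) (h : a < b) :
    PySem.List.max? (PySem.List.pyRange a b 1) (fun y => y) = some (b - 1) := by
  rw [PySem.List.pyRange_one_cons h, PySem.List.max?_id_cons]
  have hb : b = (a + 1) + ((b - a - 1).toNat : Int) := by omega
  rw [hb, pv_foldl_max_range]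
  by_cases hz : (b - a - 1).toNat = 0
  · simp only [hz, if_true]
    congr 1
    omega
  · simp only [hz, if_false]
    congr 1
    rw [Int.max_def]
    split_ifs <;> omega

-- B's scan resumed from the middle of a digit run: ds = the digits A has pending.
def pvB1 (ds : List Char) (l : List Char) (i : Int) : List Int × List (List Int) :=
  if ds.isEmpty then pvBloop l i
  else
    let r := l.takeWhile pvDigB
    let p := pvBloop (l.dropWhile pvDigB) (i + r.length)
    (((PySem.Int.ofChars? (ds ++ r)).getD 0) :: p.1,
     (PySem.List.pyRange (i - (ds.length : Int) - 1) (i + r.length + 1) 1) :: p.2)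

theorem pvB1_last (ds : List Char) (c : Char) (i : Int) (hc : pvDigB c = true) :
    pvB1 ds [c] i = ([(PySem.Int.ofChars? (ds ++ [c])).getD 0],
                     [PySem.List.pyRange (i - (ds.length : Int) - 1) (i + 2) 1]) := by
  rcases ds with _ | ⟨d, ds'⟩
  · simp [pvB1, pvBloop, hc]
    congr 1
    omega
  · simp [pvB1, pvBloop, hc]
    congr 1
    omega

theorem pvB1_shift (ds : List Char) (c : Char) (rest : List Char) (i : Int) (hc : pvDigB c = true) :
    pvB1 ds (c :: rest) i = pvB1 (ds ++ [c]) rest (i + 1) := by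
  have harg : i + ((c :: rest.takeWhile pvDigB).length : Int)
      = (i + 1) + ((rest.takeWhile pvDigB).length : Int) := by
    simp; ring
  rcases ds with _ | ⟨d, ds'⟩
  · simp only [pvB1, List.isEmpty_nil, if_true, List.isEmpty_cons, List.nil_append]
    rw [pvBloop]
    simp only [hc, dif_pos, List.takeWhile_cons, if_true, List.dropWhile_cons]
    rw [harg]
    simp only [Bool.false_eq_true, if_false]
    refine Prod.ext rfl ?_
    simp only
    congr 2
    simp
  · simp only [pvB1, List.isEmpty_cons]
    simp only [List.takeWhile_cons, hc, if_true, List.dropWhile_cons]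
    rw [harg]
    simp only [List.cons_append, Bool.false_eq_true, if_false, List.append_assoc,
      List.singleton_append]
    refine Prod.ext rfl ?_
    simp only
    congr 2
    all_goals simp
    all_goals omega

theorem pvB1_flush (ds : List Char) (c : Char) (rest : List Char) (i : Int)
    (hc : pvDigB c = false) (hds : ds ≠ []) :
    pvB1 ds (c :: rest) i =
      (((PySem.Int.ofChars? ds).getD 0) :: (pvBloop rest (i + 1)).1,
       (PySem.List.pyRange (i - (ds.length : Int) - 1) (i + 1) 1) :: (pvBloop rest (i + 1)).2) := by
  rcases ds with _ | ⟨d, ds'⟩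
  · exact absurd rfl hds
  · simp only [pvB1, List.isEmpty_cons]
    simp only [List.takeWhile_cons, hc, Bool.false_eq_true, if_false, List.dropWhile_cons]
    rw [pvBloop]
    simp only [hc, Bool.false_eq_true, dif_neg, not_false_iff]
    simp only [List.append_nil, List.length_nil, Nat.cast_zero, add_zero]

theorem pvB1_skip (c : Char) (rest : List Char) (i : Int) (hc : pvDigB c = false) :
    pvB1 [] (c :: rest) i = pvB1 [] rest (i + 1) := by
  simp only [pvB1, List.isEmpty_nil, if_true, pvBloop, hc]
  simp [pvBloop, hc]

theorem pv_key (l : List Char) : ∀ (i : Int) (ds : List Char) (ns : List Int) (vs : List (List Int)),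
    (ds = [] ∨ l ≠ []) →
    pvAloop l i ds (PySem.List.pyRange (i - ds.length) i 1) vs ns
      = (ns ++ (pvB1 ds l i).1, vs ++ (pvB1 ds l i).2) := by
  induction l with
  | nil =>
    rintro i ds ns vs (rfl | h)
    · simp [pvAloop, pvB1, pvBloop]
    · exact absurd rfl h
  | cons c rest ih =>
    rintro i ds ns vs -
    by_cases hc : pvDigB c = true
    · have hcm : c ∈ pvNums := (pv_dig_iff c).mpr hc
      rcases eq_or_ne rest [] with rfl | hr
      · -- last character is a digit: A flushes with it
        rw [pvAloop, if_pos ⟨hcm, rfl⟩]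
        simp only [PySem.List.foldl_append_singleton, List.nil_append]
        rw [← PySem.List.pyRange_one_succ_right (show i - (ds.length : Int) ≤ i by omega)]
        rw [pv_max_pyRange (i - (ds.length : Int)) (i + 1) (by omega), Option.getD_some]
        rw [show i + 1 - 1 + 1 = i + 1 from by ring]
        rw [← PySem.List.pyRange_one_succ_right (show i - (ds.length : Int) ≤ i + 1 by omega)]
        rw [pv_min_pyRange (i - (ds.length : Int)) (i + 1 + 1) (by omega), Option.getD_some]
        rw [show i + 1 + 1 = (i : Int) + 2 from by ring]
        have e2 := PySem.List.pyRange_one_cons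
          (show i - (ds.length : Int) - 1 < i + 2 by omega)
        rw [show i - (ds.length : Int) - 1 + 1 = i - (ds.length : Int) from by ring] at e2
        rw [← e2, pvAloop, pvB1_last ds c i hc]
      · -- digit, not last: A keeps accumulating
        rw [pvAloop, if_neg (fun h => hr h.2), if_pos hcm]
        rw [← PySem.List.pyRange_one_succ_right (show i - (ds.length : Int) ≤ i by omega)]
        rw [show i - (ds.length : Int) = (i + 1) - ((ds ++ [c]).length : Int) from by simp]
        rw [ih (i + 1) (ds ++ [c]) ns vs (Or.inr hr)]
        rw [pvB1_shift ds c rest i hc]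
    · have hcm : c ∉ pvNums := fun h => hc ((pv_dig_iff c).mp h)
      replace hc : pvDigB c = false := by simpa using hc
      rcases eq_or_ne ds [] with rfl | hds
      · -- not a digit, nothing pending: A just steps
        rw [pvAloop, if_neg (fun h => hcm h.1), if_neg hcm, if_neg (by simp)]
        have := ih (i + 1) [] ns vs (Or.inl rfl)
        rw [PySem.List.pyRange_one_eq_nil (by simp)] at this
        rw [PySem.List.pyRange_one_eq_nil (by simp), this, pvB1_skip c rest i hc]
      · -- not a digit, pending digits: A flushes
        rw [pvAloop, if_neg (fun h => hcm h.1), if_neg hcm,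
          if_pos (by simpa using List.length_pos_iff.mpr hds)]
        have hm : 0 < (ds.length : Int) := by
          simpa using List.length_pos_iff.mpr hds
        simp only [PySem.List.foldl_append_singleton, List.nil_append]
        rw [pv_max_pyRange (i - (ds.length : Int)) i (by omega), Option.getD_some]
        rw [show i - 1 + 1 = i from by ring]
        rw [← PySem.List.pyRange_one_succ_right (show i - (ds.length : Int) ≤ i by omega)]
        rw [pv_min_pyRange (i - (ds.length : Int)) (i + 1) (by omega), Option.getD_some]
        have e2 := PySem.List.pyRange_one_cons
          (show i - (ds.length : Int) - 1 < i + 1 by omega)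
        rw [show i - (ds.length : Int) - 1 + 1 = i - (ds.length : Int) from by ring] at e2
        rw [← e2]
        have := ih (i + 1) [] (ns ++ [(PySem.Int.ofChars? ds).getD 0])
          (vs ++ [PySem.List.pyRange (i - (ds.length : Int) - 1) (i + 1) 1]) (Or.inl rfl)
        rw [PySem.List.pyRange_one_eq_nil (by simp)] at this
        rw [this, pvB1_flush ds c rest i hc hds]
        simp only [pvB1, List.isEmpty_nil, if_true]
        simp [List.append_assoc]

-- ===== VERDICT (by name: the statement is the Claim_ definition above) =====
theorem detect_nums_spec : Claim_equal_detect_nums := by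
  intro row _
  unfold Spec_detect_nums detect_nums detect_nums_alt
  simp only
  have h := pv_key (row.toList.take (PySem.Chars.strip row.toList).length) 0 [] [] [] (Or.inl rfl)
  rw [PySem.List.pyRange_one_eq_nil (by simp)] at h
  simp only [pvB1, List.isEmpty_nil, if_true, List.nil_append] at h
  rw [h]
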